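-- pv_equiv track=rewrite | github.com/aadigwe/syntax-prosody-CU | features/add_wordlevel.py | func_HBCW
-- ===== SOURCE A (Python) =====
-- def func_HBCW(list_of_const, sent_list):
--     '''
--     Returns an array of tuples for each word in the sentence and the HBCW
--     HBCW Highest-level phrase beginning with the current word if it has else NONE
--     '''
--     HBCW = []
--     for i in range(len(sent_list)):
--         wd = sent_list[i]
--         const_with_wd = [const for const in list_of_const if (const[1].split(" ")[0] == wd and const[0] != "S")]
--         if const_with_wd:
--             tag = max(const_with_wd, key=lambda x: len(x[1].split(" ")))[0]
--             HBCW.append((wd,tag))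
--         else:
--             HBCW.append((wd,'NONE'))
--     return HBCW
-- ===== SOURCE B (Python) =====
-- def func_HBCW(list_of_const, sent_list):
--     # One pass over the constituents keeps, per first word, the tag of the
--     # longest phrase seen so far (strictly-greater replacement = first-maximal
--     # tie-break of max); then a single lookup pass over the sentence.
--     best = {}  # first word -> (tag, word count of longest phrase starting there)
--     for tag, phrase in list_of_const:
--         if tag != 'S':
--             words = phrase.split(' ')
--             fw = words[0]
--             if fw not in best or len(words) > best[fw][1]:
--                 best[fw] = (tag, len(words))
--     return [(wd, best[wd][0] if wd in best else 'NONE') for wd in sent_list]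
-- ===== Notes on version B (the rewrite author's own statement) =====
-- stated objective: faster
-- what changed: Replaces A's per-word rescan of all constituents (filter + max for every sentence word) by a single pass over the constituents that records, per first word, the tag of the longest phrase (strictly-greater replacement reproduces max's first-maximal tie-break), followed by one dictionary-lookup pass over the sentence.
import Mathlib
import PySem

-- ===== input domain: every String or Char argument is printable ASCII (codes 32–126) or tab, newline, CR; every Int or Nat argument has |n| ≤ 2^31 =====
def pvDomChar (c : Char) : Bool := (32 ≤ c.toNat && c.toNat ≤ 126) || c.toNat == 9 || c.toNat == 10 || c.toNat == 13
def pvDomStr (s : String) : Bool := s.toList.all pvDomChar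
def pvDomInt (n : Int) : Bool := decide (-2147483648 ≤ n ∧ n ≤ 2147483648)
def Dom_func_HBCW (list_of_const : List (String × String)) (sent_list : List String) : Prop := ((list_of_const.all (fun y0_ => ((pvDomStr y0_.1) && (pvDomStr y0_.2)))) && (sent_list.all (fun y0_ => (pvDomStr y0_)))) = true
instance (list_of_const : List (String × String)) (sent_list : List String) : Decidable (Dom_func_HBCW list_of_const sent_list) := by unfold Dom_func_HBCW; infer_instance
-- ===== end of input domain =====

-- B replaces A's per-word filter+max rescan of the constituents by one pass over
-- the constituents building a best-tag dictionary, then one lookup pass (faster).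

-- s.split(" ") (nonempty separator: never raises, result always nonempty)
def pvSplitSp (s : String) : List String := (PySem.Str.split? s " ").getD []
-- s.split(" ")[0]: exact, since the split list is never empty
def pvFw (s : String) : String := (pvSplitSp s).headD ""

-- ===== PORT A =====
def func_HBCW (list_of_const : List (String × String)) (sent_list : List String) : List (String × String) :=
  (PySem.List.pyRange 0 (sent_list.length : Int) 1).foldl
    (fun HBCW i =>
      let wd := PySem.List.pyGetD sent_list i ""
      let const_with_wd := list_of_const.filter
        (fun c => (pvFw c.2 == wd) && (c.1 != "S"))
      match PySem.List.max? const_with_wd (fun x => (pvSplitSp x.2).length) with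
      | some m => HBCW ++ [(wd, m.1)]
      | none => HBCW ++ [(wd, "NONE")]) []

-- ===== PORT B =====
def pvStep (best : PySem.Dict String (String × Nat)) (c : String × String) :
    PySem.Dict String (String × Nat) :=
  if c.1 != "S" then
    let n := (pvSplitSp c.2).length
    let fw := pvFw c.2
    match best.get? fw with
    | none => best.insert fw (c.1, n)
    | some p => if p.2 < n then best.insert fw (c.1, n) else best
  else best

def func_HBCW_alt (list_of_const : List (String × String)) (sent_list : List String) : List (String × String) :=
  let best := list_of_const.foldl pvStep PySem.Dict.empty
  sent_list.map (fun wd =>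
    (wd, match best.get? wd with
         | some p => p.1
         | none => "NONE"))

-- ===== PRECONDITION & SPEC =====
def Spec_func_HBCW (list_of_const : List (String × String)) (sent_list : List String) (out : List (String × String)) : Prop := out = func_HBCW_alt list_of_const sent_list
instance (list_of_const : List (String × String)) (sent_list : List String) (out : List (String × String)) : Decidable (Spec_func_HBCW list_of_const sent_list out) := by unfold Spec_func_HBCW; infer_instance

-- ===== CLAIM (what is proved, stated in full; the proofs are below) =====
def Claim_equal_func_HBCW : Prop := ∀ (list_of_const : List (String × String)) (sent_list : List String), Dom_func_HBCW list_of_const sent_list → Spec_func_HBCW list_of_const sent_list (func_HBCW list_of_const sent_list)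

-- ===== LEMMAS AND PROOFS =====

-- the guard of A's filter, for a fixed word wd
def pvG (wd : String) (c : String × String) : Bool := (pvFw c.2 == wd) && (c.1 != "S")

-- the step of Python's max(xs, key=len-of-split) (keeps the FIRST maximal element)
def pvMStep (acc : Option (String × String)) (x : String × String) : Option (String × String) :=
  match acc with
  | none => some x
  | some m => if (pvSplitSp m.2).length < (pvSplitSp x.2).length then some x else some m

-- A's running max over the constituents matching wd, as one guarded fold
def pvMaxStep (wd : String) (acc : Option (String × String)) (c : String × String) :
    Option (String × String) :=
  if pvG wd c then pvMStep acc c else acc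

-- B's per-word view of the dictionary update, carried as (tag, length)
def pvOptStep (wd : String) (acc : Option (String × Nat)) (c : String × String) :
    Option (String × Nat) :=
  if pvG wd c then
    match acc with
    | none => some (c.1, (pvSplitSp c.2).length)
    | some p => if p.2 < (pvSplitSp c.2).length then some (c.1, (pvSplitSp c.2).length) else acc
  else acc

theorem pvStep_get? (d : PySem.Dict String (String × Nat)) (c : String × String)
    (wd : String) : (pvStep d c).get? wd = pvOptStep wd (d.get? wd) c := by
  unfold pvStep pvOptStep pvG
  by_cases hs : c.1 = "S"
  · simp [hs]
  · by_cases hw : pvFw c.2 = wd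
    · cases h : d.get? wd with
      | none => simp [hs, hw, h]
      | some p =>
        simp only [hw, h]
        split_ifs with hlt <;> simp_all
    · have hw' : ¬ wd = pvFw c.2 := fun e => hw e.symm
      cases h : d.get? (pvFw c.2) with
      | none => simp [hs, hw, hw', h, PySem.Dict.get?_insert]
      | some p =>
        simp only [h]
        split_ifs with hlt <;> simp_all [PySem.Dict.get?_insert]

theorem foldl_pvStep_get? (l : List (String × String))
    (d : PySem.Dict String (String × Nat)) (wd : String) :
    (l.foldl pvStep d).get? wd = l.foldl (pvOptStep wd) (d.get? wd) := by
  induction l generalizing d with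
  | nil => rfl
  | cons c t ih => simp [List.foldl_cons, ih, pvStep_get?]

theorem foldl_opt_of_max (wd : String) (l : List (String × String))
    (a : Option (String × String)) :
    l.foldl (pvOptStep wd) (a.map (fun m => (m.1, (pvSplitSp m.2).length))) =
      (l.foldl (pvMaxStep wd) a).map (fun m => (m.1, (pvSplitSp m.2).length)) := by
  induction l generalizing a with
  | nil => rfl
  | cons c t ih =>
    simp only [List.foldl_cons]
    rw [← ih]
    congr 1
    unfold pvOptStep pvMaxStep pvMStep
    cases hg : pvG wd c with
    | false => simp
    | true =>
      cases a with
      | none => simp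
      | some m =>
        simp only [if_true, Option.map_some]
        split_ifs <;> simp

theorem perWord (list_of_const : List (String × String)) (wd : String) :
    (match PySem.List.max?
        (list_of_const.filter (pvG wd))
        (fun x => (pvSplitSp x.2).length) with
      | some m => m.1
      | none => "NONE") =
    (match (list_of_const.foldl pvStep PySem.Dict.empty).get? wd with
      | some p => p.1
      | none => "NONE") := by
  rw [foldl_pvStep_get?]
  have hd : (PySem.Dict.empty : PySem.Dict String (String × Nat)).get? wd = none := by
    simp [PySem.Dict.get?, PySem.Dict.empty]
  rw [hd]
  have h1 : list_of_const.foldl (pvOptStep wd) none =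
      (list_of_const.foldl (pvMaxStep wd) none).map
        (fun m => (m.1, (pvSplitSp m.2).length)) := by
    simpa using foldl_opt_of_max wd list_of_const none
  have h2 : list_of_const.foldl (pvMaxStep wd) none =
      PySem.List.max? (list_of_const.filter (pvG wd)) (fun x => (pvSplitSp x.2).length) := by
    rw [show pvMaxStep wd = (fun acc c => if pvG wd c then pvMStep acc c else acc) from rfl,
      PySem.List.foldl_if_eq_foldl_filter]
    unfold PySem.List.max?
    congr 1
    funext acc x
    cases acc <;> rfl
  rw [h1, h2]
  cases PySem.List.max? (list_of_const.filter (pvG wd)) (fun x => (pvSplitSp x.2).length) <;> rfl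

-- ===== VERDICT (by name: the statement is the Claim_ definition above) =====
theorem func_HBCW_spec : Claim_equal_func_HBCW := by
  intro list_of_const sent_list _
  unfold Spec_func_HBCW func_HBCW func_HBCW_alt
  show (PySem.List.pyRange 0 (sent_list.length : Int) 1).foldl
      (fun HBCW i =>
        (fun (acc : List (String × String)) (wd : String) =>
          match PySem.List.max?
              (list_of_const.filter (fun c => (pvFw c.2 == wd) && (c.1 != "S")))
              (fun x => (pvSplitSp x.2).length) with
          | some m => acc ++ [(wd, m.1)]
          | none => acc ++ [(wd, "NONE")]) HBCW (PySem.List.pyGetD sent_list i "")) [] =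
    sent_list.map (fun wd =>
      (wd, match (list_of_const.foldl pvStep PySem.Dict.empty).get? wd with
           | some p => p.1
           | none => "NONE"))
  rw [PySem.List.foldl_pyRange_zero_pyGetD' sent_list ""
    (fun (acc : List (String × String)) (wd : String) =>
      match PySem.List.max?
          (list_of_const.filter (fun c => (pvFw c.2 == wd) && (c.1 != "S")))
          (fun x => (pvSplitSp x.2).length) with
      | some m => acc ++ [(wd, m.1)]
      | none => acc ++ [(wd, "NONE")]) []]
  have hbody : ∀ (acc : List (String × String)) (wd : String), wd ∈ sent_list →
      (match PySem.List.max?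
          (list_of_const.filter (fun c => (pvFw c.2 == wd) && (c.1 != "S")))
          (fun x => (pvSplitSp x.2).length) with
        | some m => acc ++ [(wd, m.1)]
        | none => acc ++ [(wd, "NONE")]) =
      acc ++ [(wd,
        match (list_of_const.foldl pvStep PySem.Dict.empty).get? wd with
        | some p => p.1
        | none => "NONE")] := by
    intro acc wd _
    rw [← perWord list_of_const wd]
    unfold pvG
    cases PySem.List.max?
        (list_of_const.filter (fun c => (pvFw c.2 == wd) && (c.1 != "S")))
        (fun x => (pvSplitSp x.2).length) <;> rfl
  refine Eq.trans (PySem.List.foldl_congr_mem sent_list _ (g := fun acc wd =>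
      acc ++ [(wd,
        match (list_of_const.foldl pvStep PySem.Dict.empty).get? wd with
        | some p => p.1
        | none => "NONE")]) [] hbody) ?_
  rw [PySem.List.foldl_append_singleton_eq_map]
  rfl
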